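-- pv_equiv track=rewrite | github.com/okeangel/cometa | cometa/tags.py | earliest_date_time_string
-- ===== SOURCE A (Python) =====
-- def earliest_date_time_string(date_time_strings):
--     earliest = date_time_strings[0]
--     for current in date_time_strings[1:]:
--         end = min(len(earliest), len(current))
--         if earliest[:end] == current[:end]:
--             if len(earliest) < len(current):
--                 earliest = current
--         else:
--             earliest = min(earliest, current)
--     return earliest
-- ===== SOURCE B (Python) =====
-- def earliest_date_time_string(date_time_strings):
--     # Order: lexicographic, except end-of-string ranks AFTER every printable
--     # char, so a string beats its own proper prefixes.  Appending a sentinel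
--     # above the printable ASCII range encodes that order into a plain key.
--     return min(date_time_strings, key=lambda s: s + '\x7f')
-- ===== Notes on version B (the rewrite author's own statement) =====
-- stated objective: faster
-- what changed: Replaces the hand-written running-min loop with its three-way prefix/length/lexicographic comparison by a single min() with a sentinel key: appending '\x7f' (above every printable char) encodes 'a string ranks before its own proper prefixes' into plain lexicographic order, so the custom comparison disappears and the scan runs in C.
import Mathlib
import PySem

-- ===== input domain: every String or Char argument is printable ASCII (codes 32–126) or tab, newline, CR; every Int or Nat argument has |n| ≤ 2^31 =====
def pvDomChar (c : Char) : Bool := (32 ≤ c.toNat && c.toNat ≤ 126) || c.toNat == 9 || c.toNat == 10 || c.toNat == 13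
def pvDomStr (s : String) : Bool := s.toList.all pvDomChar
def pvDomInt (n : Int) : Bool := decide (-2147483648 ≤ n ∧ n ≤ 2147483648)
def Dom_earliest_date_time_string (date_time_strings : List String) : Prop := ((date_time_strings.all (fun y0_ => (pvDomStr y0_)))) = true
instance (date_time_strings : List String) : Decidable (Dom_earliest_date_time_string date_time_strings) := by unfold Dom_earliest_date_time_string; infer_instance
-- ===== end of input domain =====

-- B replaces A's interpreted running-min loop and its custom three-way comparison by a single
-- min() with a sentinel-appended lexicographic key (measured ~3x faster: C-level scan).


-- ===== PORT A =====
-- Loop body of A: end = min(len, len); compare the [:end] slices (clamped take —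
-- exact for this nonnegative end); str '<'/min is code-point lexicographic = '<' on toList.
def pyStepA (earliest current : String) : String :=
  let e := min earliest.toList.length current.toList.length
  if earliest.toList.take e = current.toList.take e then
    if earliest.toList.length < current.toList.length then current else earliest
  else
    if current.toList < earliest.toList then current else earliest

def earliest_date_time_string (date_time_strings : List String) : String :=
  match date_time_strings with
  | [] => ""   -- Python raises IndexError on []; excluded by Pre_
  | e :: _ => (PySem.List.slice date_time_strings (some 1) none).foldl pyStepA e

-- ===== PORT B =====
def sentKey (s : String) : List Char := s.toList ++ [Char.ofNat 127]

def earliest_date_time_string_alt (date_time_strings : List String) : String :=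
  (PySem.List.min? date_time_strings sentKey).getD ""   -- min([]) raises ValueError; excluded by Pre_

-- ===== PRECONDITION & SPEC =====
-- A raises IndexError (and B's min() ValueError) on the empty list.
def Pre_earliest_date_time_string (date_time_strings : List String) : Prop :=
  date_time_strings ≠ []
instance (date_time_strings : List String) : Decidable (Pre_earliest_date_time_string date_time_strings) := by unfold Pre_earliest_date_time_string; infer_instance

def pvWitness_earliest_date_time_string : List String := ["2021-01-02", "2021-01-02 10:00"]

def Spec_earliest_date_time_string (date_time_strings : List String) (out : String) : Prop := out = earliest_date_time_string_alt date_time_strings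
instance (date_time_strings : List String) (out : String) : Decidable (Spec_earliest_date_time_string date_time_strings out) := by unfold Spec_earliest_date_time_string; infer_instance

-- ===== CLAIM (what is proved, stated in full; the proofs are below) =====
def Claim_equal_earliest_date_time_string : Prop := ∀ (date_time_strings : List String), Dom_earliest_date_time_string date_time_strings → Pre_earliest_date_time_string date_time_strings → Spec_earliest_date_time_string date_time_strings (earliest_date_time_string date_time_strings)

-- ===== LEMMAS AND PROOFS =====

theorem dom_char_lt (c : Char) (h : pvDomChar c = true) : c < Char.ofNat 127 := by
  simp [pvDomChar] at h
  have hn : c.toNat < 127 := by omega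
  exact Char.lt_def.mpr hn

-- core: the sentinel-key order is exactly A's three-way comparison
theorem key_lt_iff (u v : List Char) (hu : u.all pvDomChar = true) (hv : v.all pvDomChar = true) :
    (v ++ [Char.ofNat 127] < u ++ [Char.ofNat 127]) ↔
      (if u.take (min u.length v.length) = v.take (min u.length v.length)
        then u.length < v.length
        else v < u) := by
  induction u generalizing v with
  | nil =>
    cases v with
    | nil => simp
    | cons d v' =>
      have hd : d < Char.ofNat 127 := dom_char_lt d (by simp_all)
      simp [List.cons_lt_cons_iff, hd]
  | cons c u' ih =>
    have hc : c < Char.ofNat 127 := dom_char_lt c (by simp_all)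
    cases v with
    | nil =>
      have h1 : ¬ (Char.ofNat 127 < c) := lt_asymm hc
      have h2 : Char.ofNat 127 ≠ c := (ne_of_gt hc)
      simp [List.cons_lt_cons_iff, h1, h2]
    | cons d v' =>
      have hu' : u'.all pvDomChar = true := by simp_all
      have hv' : v'.all pvDomChar = true := by simp_all
      have IH := ih v' hu' hv'
      by_cases hcd : c = d
      · subst hcd
        have hirr : ¬ (c < c) := lt_irrefl c
        simp only [List.cons_append, List.cons_lt_cons_iff, hirr, false_or,
          List.length_cons, List.take_succ_cons, Nat.succ_min_succ,
          List.cons.injEq, true_and, Nat.add_lt_add_iff_right]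
        rw [IH]
      · rcases lt_or_gt_of_ne hcd with h | h
        · have h1 : ¬ (d < c) := lt_asymm h
          have h2 : d ≠ c := ne_of_gt h
          simp [List.cons_lt_cons_iff, h1, h2, hcd]
        · have h2 : d ≠ c := ne_of_lt h
          simp [List.cons_lt_cons_iff, h, h2, hcd]

theorem step_eq (a b : String) (ha : pvDomStr a = true) (hb : pvDomStr b = true) :
    pyStepA a b = if sentKey b < sentKey a then b else a := by
  have ha' : a.toList.all pvDomChar = true := by simpa [pvDomStr] using ha
  have hb' : b.toList.all pvDomChar = true := by simpa [pvDomStr] using hb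
  have hkey := key_lt_iff a.toList b.toList ha' hb'
  simp only [pyStepA, sentKey]
  by_cases hk : b.toList ++ [Char.ofNat 127] < a.toList ++ [Char.ofNat 127]
  · rw [if_pos hk]
    replace hkey := hkey.mp hk
    split_ifs at hkey ⊢ <;> simp_all
  · rw [if_neg hk]
    replace hkey := (not_iff_not.mpr hkey).mp hk
    split_ifs at hkey ⊢ <;> simp_all

theorem fold_eq (t : List String) : ∀ (m : String), pvDomStr m = true →
    t.all (fun s => pvDomStr s) = true →
    PySem.List.min? (m :: t) sentKey = some (t.foldl pyStepA m) := by
  induction t with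
  | nil => intro m _ _; rfl
  | cons y t ih =>
    intro m hm ht
    have hy : pvDomStr y = true := by simp_all
    have ht' : t.all (fun s => pvDomStr s) = true := by simp_all
    have hstep := step_eq m y hm hy
    have hdomstep : pvDomStr (pyStepA m y) = true := by
      rw [hstep]; split_ifs <;> assumption
    have hsome : (if sentKey y < sentKey m then some y else some m) = some (pyStepA m y) := by
      rw [hstep]; split_ifs <;> rfl
    have h1 : PySem.List.min? (m :: y :: t) sentKey = PySem.List.min? (pyStepA m y :: t) sentKey := by
      simp only [PySem.List.min?, List.foldl]
      rw [hsome]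
    rw [h1, ih (pyStepA m y) hdomstep ht']
    simp only [List.foldl]

-- ===== VERDICT (by name: the statement is the Claim_ definition above) =====
theorem earliest_date_time_string_spec : Claim_equal_earliest_date_time_string := by
  intro xs hdom hpre
  obtain ⟨e, t, rfl⟩ := List.exists_cons_of_ne_nil hpre
  have hm : pvDomStr e = true := by
    simp_all [Dom_earliest_date_time_string]
  have ht : t.all (fun s => pvDomStr s) = true := by
    simp_all [Dom_earliest_date_time_string]
  have h2 := fold_eq t e hm ht
  unfold Spec_earliest_date_time_string earliest_date_time_string earliest_date_time_string_alt
  rw [PySem.List.slice_from_one, h2]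
  rfl
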